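-- pv_equiv track=rewrite | github.com/KimchiKing-no1/Persian-Incursion-RL | mcts_agent.py | _cost_extract
-- ===== SOURCE A (Python) =====
-- def _cost_extract(cost: str, letter: str) -> int:
--     """
--     Extract numeric requirement for a letter ('P','I','M') from a cost string.
--     Robust to formats like '3P, 2I' or '1 M'.
--     """
--     letter = letter.upper()
--     total = 0
--     cur_num = ""
--     for ch in cost:
--         if ch.isdigit():
--             cur_num += ch
--         elif ch.isalpha():
--             if cur_num and ch.upper() == letter:
--                 total += int(cur_num)
--             cur_num = ""
--         else:
--             cur_num = ""
--     return total
-- ===== SOURCE B (Python) =====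
-- def _cost_extract(cost: str, letter: str) -> int:
--     """Run-based scan: jump over maximal digit runs and inspect the single
--     character that follows, instead of a per-character FSM with a string buffer."""
--     L = letter.upper()
--     total = 0
--     i, n = 0, len(cost)
--     while i < n:
--         if cost[i].isdigit():
--             j = i + 1
--             while j < n and cost[j].isdigit():
--                 j += 1
--             if j < n and cost[j].isalpha() and cost[j].upper() == L:
--                 total += int(cost[i:j])
--             i = j + 1
--         else:
--             i += 1
--     return total
-- ===== Notes on version B (the rewrite author's own statement) =====
-- stated objective: alternative
-- what changed: Replaces the per-character FSM that accumulates a digit-buffer string with an index-jumping scan that locates each maximal digit run and inspects only the single character after it.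
import Mathlib
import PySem

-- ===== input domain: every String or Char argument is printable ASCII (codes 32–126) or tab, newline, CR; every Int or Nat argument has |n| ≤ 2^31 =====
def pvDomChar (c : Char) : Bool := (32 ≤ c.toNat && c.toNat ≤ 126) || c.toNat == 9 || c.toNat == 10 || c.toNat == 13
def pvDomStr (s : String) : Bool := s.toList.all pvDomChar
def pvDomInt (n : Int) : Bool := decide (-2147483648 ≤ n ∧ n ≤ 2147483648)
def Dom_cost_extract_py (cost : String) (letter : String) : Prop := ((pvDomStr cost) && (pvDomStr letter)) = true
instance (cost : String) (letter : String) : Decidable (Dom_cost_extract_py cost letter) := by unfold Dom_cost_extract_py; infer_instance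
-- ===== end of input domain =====

-- B replaces A's per-character FSM (digit-buffer string) with a run-jumping scan; alternative structure, same cost.

-- ===== PORT A =====
-- one step of A's for-loop: state = (total, cur_num as a char list)
def stepA (L : String) (st : Int × List Char) (ch : Char) : Int × List Char :=
  if PySem.Chars.isdigit ch then (st.1, st.2 ++ [ch])
  else if PySem.Chars.isalpha ch then
    ((if st.2 ≠ [] ∧ String.mk [PySem.Chars.upperChar ch] = L then
        st.1 + (PySem.Int.ofChars? st.2).getD 0 else st.1), [])
  else (st.1, [])

def cost_extract_py (cost : String) (letter : String) : Int :=
  let L := PySem.Str.upper letter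
  (cost.toList.foldl (stepA L) (0, [])).1

-- ===== PORT B =====
-- B's while loop as recursion on the remaining suffix: on a digit, take the
-- maximal digit run, look at the char right after it, continue past it.
def altGo (L : String) (s : List Char) : Int :=
  match s with
  | [] => 0
  | c :: rest =>
    if PySem.Chars.isdigit c then
      match h : rest.dropWhile PySem.Chars.isdigit with
      | [] => 0
      | d :: rest' =>
        (if PySem.Chars.isalpha d ∧ String.mk [PySem.Chars.upperChar d] = L then
           (PySem.Int.ofChars? (c :: rest.takeWhile PySem.Chars.isdigit)).getD 0 else 0)
        + altGo L rest'
    else altGo L rest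
termination_by s.length
decreasing_by
  · have h1 : (rest.dropWhile PySem.Chars.isdigit).length ≤ rest.length :=
      rest.length_dropWhile_le _
    rw [h] at h1
    simp at h1 ⊢
    omega
  · simp

def cost_extract_py_alt (cost : String) (letter : String) : Int :=
  altGo (PySem.Str.upper letter) cost.toList

-- ===== PRECONDITION & SPEC =====
def Spec_cost_extract_py (cost : String) (letter : String) (out : Int) : Prop := out = cost_extract_py_alt cost letter
instance (cost : String) (letter : String) (out : Int) : Decidable (Spec_cost_extract_py cost letter out) := by unfold Spec_cost_extract_py; infer_instance

-- ===== CLAIM (what is proved, stated in full; the proofs are below) =====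
def Claim_equal_cost_extract_py : Prop := ∀ (cost : String) (letter : String), Dom_cost_extract_py cost letter → Spec_cost_extract_py cost letter (cost_extract_py cost letter)

-- ===== LEMMAS AND PROOFS =====

-- char-at-a-time reading of the scan, with the pending digit prefix `cur`
def gAux (L : String) (cur : List Char) (s : List Char) : Int :=
  match s with
  | [] => 0
  | c :: r =>
    if PySem.Chars.isdigit c then gAux L (cur ++ [c]) r
    else if PySem.Chars.isalpha c then
      (if cur ≠ [] ∧ String.mk [PySem.Chars.upperChar c] = L then
         (PySem.Int.ofChars? cur).getD 0 else 0) + gAux L [] r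
    else gAux L [] r

-- the tail of B's digit case, with the run already collected
def altTail (L : String) (run : List Char) (s : List Char) : Int :=
  match s with
  | [] => 0
  | d :: r' =>
    (if PySem.Chars.isalpha d ∧ String.mk [PySem.Chars.upperChar d] = L then
       (PySem.Int.ofChars? run).getD 0 else 0) + altGo L r'

theorem foldl_stepA (L : String) (s : List Char) : ∀ (t : Int) (cur : List Char),
    (s.foldl (stepA L) (t, cur)).1 = t + gAux L cur s := by
  induction s with
  | nil => intro t cur; simp [gAux]
  | cons c r ih =>
    intro t cur
    by_cases hd : PySem.Chars.isdigit c
    · simp [stepA, hd, gAux, ih]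
    · by_cases ha : PySem.Chars.isalpha c
      · by_cases hc : cur ≠ [] ∧ String.mk [PySem.Chars.upperChar c] = L
        · simp [stepA, hd, ha, hc, gAux, ih]; ring
        · simp [stepA, hd, ha, hc, gAux, ih]
      · simp [stepA, hd, ha, gAux, ih]

theorem altGo_digit (L : String) (c : Char) (rest : List Char)
    (hd : PySem.Chars.isdigit c) :
    altGo L (c :: rest) = altTail L (c :: rest.takeWhile PySem.Chars.isdigit)
      (rest.dropWhile PySem.Chars.isdigit) := by
  rw [altGo]
  cases h : rest.dropWhile PySem.Chars.isdigit with
  | nil => simp [hd, h, altTail]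
  | cons d r' => simp [hd, h, altTail]

theorem gAux_eq (L : String) : ∀ (n : Nat) (s : List Char), s.length ≤ n →
    (gAux L [] s = altGo L s) ∧
    (∀ cur : List Char, cur ≠ [] →
      gAux L cur s = altTail L (cur ++ s.takeWhile PySem.Chars.isdigit)
        (s.dropWhile PySem.Chars.isdigit)) := by
  intro n
  induction n with
  | zero =>
    intro s hs
    have : s = [] := List.eq_nil_of_length_eq_zero (Nat.le_zero.mp hs)
    subst this
    exact ⟨by rw [gAux, altGo], fun cur _ => by simp [gAux, altTail]⟩
  | succ m ih =>
    intro s hs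
    cases s with
    | nil => exact ⟨by rw [gAux, altGo], fun cur _ => by simp [gAux, altTail]⟩
    | cons c r =>
      have hr : r.length ≤ m := by simpa using Nat.lt_succ_iff.mp (Nat.lt_of_lt_of_le (by simp) hs)
      constructor
      · by_cases hd : PySem.Chars.isdigit c
        · rw [gAux, if_pos hd]
          simp only [List.nil_append]
          rw [(ih r hr).2 [c] (by simp), altGo_digit L c r hd]
          simp
        · by_cases ha : PySem.Chars.isalpha c
          · rw [gAux, altGo]
            simp [hd, ha, (ih r hr).1]
          · rw [gAux, altGo]
            simp [hd, ha, (ih r hr).1]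
      · intro cur hcur
        by_cases hd : PySem.Chars.isdigit c
        · rw [gAux, if_pos hd, (ih r hr).2 (cur ++ [c]) (by simp)]
          simp [hd]
        · by_cases ha : PySem.Chars.isalpha c
          · rw [gAux]
            simp only [hd, if_false, ha, if_true, List.takeWhile_cons, List.dropWhile_cons]
            rw [altTail.eq_def]
            simp [hcur, ha, (ih r hr).1]
          · rw [gAux]
            simp only [hd, if_false, ha, List.takeWhile_cons, List.dropWhile_cons]
            rw [altTail.eq_def]
            simp [hd, ha, (ih r hr).1]

-- ===== VERDICT (by name: the statement is the Claim_ definition above) =====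
theorem cost_extract_py_spec : Claim_equal_cost_extract_py := by
  intro cost letter _
  unfold Spec_cost_extract_py cost_extract_py cost_extract_py_alt
  rw [foldl_stepA, (gAux_eq (PySem.Str.upper letter) cost.toList.length cost.toList le_rfl).1]
  ring
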